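-- pv_equiv track=rewrite | github.com/topnotch-automate/ghana-loterry-explorer | python-service/lottOracleV2.py | _find_recurring_numbers
-- ===== SOURCE A (Python) =====
-- from typing import List, Dict, Tuple
-- from collections import Counter, deque
--
-- def _find_recurring_numbers(yearly_numbers: Dict[int, List[int]], min_years: int = 2) -> List[int]:
--     """Find numbers that appear in hot/cold lists across multiple years"""
--     if not yearly_numbers:
--         return []
--
--     number_year_count = Counter()
--     for year, numbers in yearly_numbers.items():
--         for num in numbers:
--             number_year_count[num] += 1
--
--     # Return numbers appearing in at least min_years
--     recurring = [num for num, count in number_year_count.items() if count >= min_years]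
--     return sorted(recurring, key=lambda x: number_year_count[x], reverse=True)[:10]
-- ===== SOURCE B (Python) =====
-- def _find_recurring_numbers(yearly_numbers, min_years=2):
--     """Counting-range scan instead of comparison sort: bucket numbers by
--     occurrence count and read counts from the maximum down to the threshold."""
--     counts = {}
--     for numbers in yearly_numbers.values():
--         for n in numbers:
--             counts[n] = counts.get(n, 0) + 1
--     hi = 0
--     for v in counts.values():
--         hi = max(hi, v)
--     lo = max(min_years, 1)
--     result = []
--     for c in range(hi, lo - 1, -1):
--         for n, k in counts.items():
--             if k == c:
--                 result.append(n)
--     return result[:10]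
-- ===== Notes on version B (the rewrite author's own statement) =====
-- stated objective: alternative
-- what changed: Replaces A's stable comparison sort of the recurring numbers (key=count, reverse=True) by a counting-range scan: build the same occurrence counter, compute its maximum count, then walk the count values from that maximum down to max(min_years,1), emitting the counter's numbers with exactly that count in insertion order, and take the first 10.
import Mathlib
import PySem

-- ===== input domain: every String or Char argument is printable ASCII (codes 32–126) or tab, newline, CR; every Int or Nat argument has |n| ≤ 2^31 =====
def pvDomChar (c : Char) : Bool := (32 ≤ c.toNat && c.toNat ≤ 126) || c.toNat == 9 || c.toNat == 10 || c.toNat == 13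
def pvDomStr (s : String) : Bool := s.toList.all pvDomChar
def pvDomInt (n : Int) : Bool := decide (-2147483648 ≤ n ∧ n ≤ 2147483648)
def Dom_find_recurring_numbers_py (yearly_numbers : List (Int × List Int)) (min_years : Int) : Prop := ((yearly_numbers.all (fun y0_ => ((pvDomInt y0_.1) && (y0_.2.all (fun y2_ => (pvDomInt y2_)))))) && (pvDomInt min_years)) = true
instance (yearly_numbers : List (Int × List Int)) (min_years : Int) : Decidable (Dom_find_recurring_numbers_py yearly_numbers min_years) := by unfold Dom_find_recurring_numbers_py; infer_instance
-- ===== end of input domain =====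

-- B replaces A's stable comparison sort (sorted by count, descending) with a counting-range
-- scan reading each occurrence count from the maximum down to the threshold (objective: alternative).

-- ===== PORT A =====
-- dict argument is modelled as PySem.Dict.ofList of the association list (duplicate keys overwrite, as in Python)
def find_recurring_numbers_py (yearly_numbers : List (Int × List Int)) (min_years : Int) : List Int :=
  let d := PySem.Dict.ofList yearly_numbers
  if d.items = [] then []
  else
    let number_year_count : PySem.Dict Int Int :=
      d.items.foldl (fun c p => p.2.foldl (fun c num => c.modify num 0 (· + 1)) c) PySem.Dict.empty
    let recurring : List Int :=
      number_year_count.items.foldl (fun acc p => if min_years ≤ p.2 then acc ++ [p.1] else acc) []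
    PySem.List.slice (PySem.List.sorted recurring (fun x => number_year_count.getD x 0) true) none (some 10)

-- ===== PORT B =====
def find_recurring_numbers_py_alt (yearly_numbers : List (Int × List Int)) (min_years : Int) : List Int :=
  let d := PySem.Dict.ofList yearly_numbers
  let counts : PySem.Dict Int Int :=
    d.values.foldl (fun c numbers => numbers.foldl (fun c n => c.insert n (c.getD n 0 + 1)) c) PySem.Dict.empty
  let hi := counts.values.foldl (fun h v => max h v) 0
  let lo := max min_years 1
  let result := (PySem.List.pyRange hi (lo - 1) (-1)).foldl
      (fun acc c => counts.items.foldl (fun acc p => if p.2 == c then acc ++ [p.1] else acc) acc) []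
  PySem.List.slice result none (some 10)

-- ===== PRECONDITION & SPEC =====
def Spec_find_recurring_numbers_py (yearly_numbers : List (Int × List Int)) (min_years : Int) (out : List Int) : Prop := out = find_recurring_numbers_py_alt yearly_numbers min_years
instance (yearly_numbers : List (Int × List Int)) (min_years : Int) (out : List Int) : Decidable (Spec_find_recurring_numbers_py yearly_numbers min_years out) := by unfold Spec_find_recurring_numbers_py; infer_instance

-- ===== CLAIM (what is proved, stated in full; the proofs are below) =====
def Claim_equal_find_recurring_numbers_py : Prop := ∀ (yearly_numbers : List (Int × List Int)) (min_years : Int), Dom_find_recurring_numbers_py yearly_numbers min_years → Spec_find_recurring_numbers_py yearly_numbers min_years (find_recurring_numbers_py yearly_numbers min_years)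

-- ===== LEMMAS AND PROOFS =====

-- insertBy skips a prefix it does not go before
lemma insertBy_append_of_not_before {α : Type} (before : α → α → Bool) (x : α) (l1 l2 : List α)
    (h : ∀ y ∈ l1, before x y = false) :
    PySem.List.insertBy before x (l1 ++ l2) = l1 ++ PySem.List.insertBy before x l2 := by
  induction l1 with
  | nil => simp
  | cons y ys ih =>
    have hy : before x y = false := h y (by simp)
    simp [PySem.List.insertBy, hy, ih (fun z hz => h z (by simp [hz]))]

-- insertBy goes to the front when it goes before every element
lemma insertBy_front {α : Type} (before : α → α → Bool) (x : α) (l : List α)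
    (h : ∀ y ∈ l, before x y = true) :
    PySem.List.insertBy before x l = x :: l := by
  cases l with
  | nil => simp [PySem.List.insertBy]
  | cons y ys => simp [PySem.List.insertBy, h y (by simp)]

lemma sorted_rev_append_singleton {α : Type} (f : α → Int) (R : List α) (x : α) :
    PySem.List.sorted (R ++ [x]) f true
      = PySem.List.insertBy (fun a b => decide (f b < f a)) x (PySem.List.sorted R f true) := by
  rw [PySem.List.sorted_rev_eq_foldl_insertBy, PySem.List.sorted_rev_eq_foldl_insertBy,
    List.foldl_append]
  rfl

-- a stable descending sort puts the maximal-key elements first, in order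
lemma sorted_rev_split_max {α : Type} (f : α → Int) (c : Int) (R : List α)
    (h : ∀ x ∈ R, f x ≤ c) :
    PySem.List.sorted R f true
      = R.filter (fun x => f x == c)
        ++ PySem.List.sorted (R.filter (fun x => !(f x == c))) f true := by
  induction R using List.reverseRecOn with
  | nil => simp
  | append_singleton R x ih =>
    have hR : ∀ y ∈ R, f y ≤ c := fun y hy => h y (by simp [hy])
    have hx : f x ≤ c := h x (by simp)
    rw [sorted_rev_append_singleton, ih hR]
    by_cases hc : f x = c
    · rw [insertBy_append_of_not_before _ _ _ _ (by
        intro y hy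
        have := (List.mem_filter.mp hy).2
        simp only [beq_iff_eq] at this
        simp [this, hc])]
      rw [insertBy_front _ _ _ (by
        intro y hy
        have hy' : y ∈ R.filter (fun z => !(f z == c)) :=
          (PySem.List.sorted_perm _ _ _).mem_iff.mp hy
        have h1 := (List.mem_filter.mp hy').1
        have h2 := (List.mem_filter.mp hy').2
        simp only [Bool.not_eq_eq_eq_not, Bool.not_true, beq_eq_false_iff_ne, ne_eq] at h2
        have := hR y h1
        simp only [decide_eq_true_eq, hc]
        omega)]
      simp [List.filter_append, hc]
    · have hlt : f x < c := lt_of_le_of_ne hx hc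
      rw [insertBy_append_of_not_before _ _ _ _ (by
        intro y hy
        have := (List.mem_filter.mp hy).2
        simp only [beq_iff_eq] at this
        simp only [decide_eq_false_iff_not, not_lt, this]
        omega)]
      rw [← sorted_rev_append_singleton]
      simp [List.filter_append, hc]

-- stable descending sort = concatenation of the per-count filters, counts read in descending order
lemma stable_sort_desc {α : Type} (f : α → Int) (D : List Int) (R : List α)
    (hD : D.Pairwise (· > ·)) (hmem : ∀ x ∈ R, f x ∈ D) :
    PySem.List.sorted R f true = D.flatMap (fun c => R.filter (fun x => f x == c)) := by
  induction D generalizing R with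
  | nil =>
    have hnil : R = [] := by
      cases R with
      | nil => rfl
      | cons a t => exact absurd (hmem a (by simp)) (by simp)
    subst hnil
    simp [PySem.List.sorted]
  | cons c D' ih =>
    have hc : ∀ b ∈ D', b < c := fun b hb => List.rel_of_pairwise_cons hD hb
    have hle : ∀ x ∈ R, f x ≤ c := by
      intro x hx
      rcases List.mem_cons.mp (hmem x hx) with h | h
      · omega
      · exact le_of_lt (hc _ h)
    rw [sorted_rev_split_max f c R hle]
    rw [ih (List.Pairwise.of_cons hD) (R := R.filter (fun x => !(f x == c))) (by
      intro x hx
      have h1 := (List.mem_filter.mp hx).1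
      have h2 := (List.mem_filter.mp hx).2
      simp only [Bool.not_eq_eq_eq_not, Bool.not_true, beq_eq_false_iff_ne, ne_eq] at h2
      rcases List.mem_cons.mp (hmem x h1) with h | h
      · exact absurd h h2
      · exact h)]
    rw [List.flatMap_cons]
    congr 1
    refine List.flatMap_congr ?_
    intro b hb
    rw [List.filter_filter]
    refine List.filter_congr ?_
    intro x hx
    have hbc : b ≠ c := by have := hc b hb; omega
    by_cases hxb : f x = b
    · simp [hxb, hbc]
    · simp [hxb]

-- the two counting loops build the same counter over the flattened value lists
lemma counterA (items : List (Int × List Int)) :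
    items.foldl (fun c p => p.2.foldl (fun c num => c.modify num 0 (· + 1)) c) PySem.Dict.empty
      = PySem.Dict.counter ((items.map (fun p => p.2)).flatten) := by
  rw [PySem.Dict.counter_eq_foldl, List.foldl_flatten, List.foldl_map]

lemma counterB (items : List (Int × List Int)) :
    (items.map (fun p => p.2)).foldl
        (fun c numbers => numbers.foldl (fun c n => c.insert n (c.getD n 0 + 1)) c) PySem.Dict.empty
      = PySem.Dict.counter ((items.map (fun p => p.2)).flatten) := by
  rw [← PySem.Dict.foldl_insert_getD_add_one_eq_counter, List.foldl_flatten, List.foldl_map]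

-- the heart of the equivalence, stated over the flattened multiset of numbers
lemma core (allNums : List Int) (mins : Int) :
    PySem.List.sorted
        ((PySem.Dict.counter allNums).items.foldl
          (fun acc p => if mins ≤ p.2 then acc ++ [p.1] else acc) [])
        (fun x => (PySem.Dict.counter allNums).getD x 0) true
      = (PySem.List.pyRange ((PySem.Dict.counter allNums).values.foldl (fun h v => max h v) 0)
            (max mins 1 - 1) (-1)).foldl
          (fun acc c => (PySem.Dict.counter allNums).items.foldl
            (fun acc p => if p.2 == c then acc ++ [p.1] else acc) acc) [] := by
  have hkey : (fun x => (PySem.Dict.counter allNums).getD x 0)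
      = (fun x : Int => ((allNums.count x : Int))) := by
    funext x; exact PySem.Dict.getD_counter allNums x
  have hitems := PySem.Dict.items_counter (κ := Int) allNums
  set K := PySem.Set.ofList allNums with hK
  set hi := (PySem.Dict.counter allNums).values.foldl (fun h v => max h v) 0 with hhi
  set lo := max mins 1 with hlo
  -- A's recurring list is a filter of K
  have hrec : (PySem.Dict.counter allNums).items.foldl
      (fun acc p => if mins ≤ p.2 then acc ++ [p.1] else acc) []
      = K.filter (fun k => decide (mins ≤ (allNums.count k : Int))) := by
    rw [PySem.List.foldl_append_ite (p := fun p : Int × Int => mins ≤ p.2) (f := fun p => p.1)]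
    rw [hitems, List.filter_map, List.map_map]
    simp [Function.comp_def]
  -- B's inner loop is a filter of K
  have hinner : ∀ (acc : List Int) (c : Int),
      (PySem.Dict.counter allNums).items.foldl
        (fun acc p => if p.2 == c then acc ++ [p.1] else acc) acc
      = acc ++ K.filter (fun k => ((allNums.count k : Int) == c)) := by
    intro acc c
    rw [PySem.List.foldl_append_if (p := fun p : Int × Int => p.2 == c) (f := fun p => p.1)]
    rw [hitems, List.filter_map, List.map_map]
    simp [Function.comp_def]
  -- every count of an element of K is between 1 and hi
  have hvals : (PySem.Dict.counter allNums).values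
      = K.map (fun k => (allNums.count k : Int)) := by
    have := PySem.Dict.values_eq_map_keys (PySem.Dict.counter allNums)
      (PySem.Dict.nodup_keys_counter allNums) 0
    rw [this, PySem.Dict.keys_counter]
    refine List.map_congr_left ?_
    intro k _
    exact PySem.Dict.getD_counter allNums k
  have hle_hi : ∀ k ∈ K, (allNums.count k : Int) ≤ hi := by
    intro k hk
    have hmem : (allNums.count k : Int) ∈ (PySem.Dict.counter allNums).values := by
      rw [hvals]; exact List.mem_map_of_mem hk
    exact (PySem.List.le_foldl_max _ _).2 _ hmem
  have hone : ∀ k ∈ K, 1 ≤ (allNums.count k : Int) := by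
    intro k hk
    have : k ∈ allNums := (PySem.Set.mem_ofList _ _).mp hk
    have := List.count_pos_iff.mpr this
    omega
  -- rewrite B's loop into a flatMap
  rw [PySem.List.foldl_congr_mem _ _
      (fun acc c => acc ++ K.filter (fun k => ((allNums.count k : Int) == c))) []
      (fun acc c _ => hinner acc c)]
  rw [PySem.List.foldl_append_eq_flatMap]
  rw [hrec, hkey]
  set R := K.filter (fun k => decide (mins ≤ (allNums.count k : Int))) with hR
  -- apply the stable-sort characterisation
  have hD : (PySem.List.pyRange hi (lo - 1) (-1)).Pairwise (· > ·) := by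
    rw [PySem.List.pyRange_neg_one_eq_reverse]
    rw [List.pairwise_reverse]
    exact PySem.List.pairwise_lt_pyRange_one _ _
  have hmemD : ∀ x ∈ R, (allNums.count x : Int) ∈ PySem.List.pyRange hi (lo - 1) (-1) := by
    intro x hx
    have h1 := (List.mem_filter.mp hx).1
    have h2 := (List.mem_filter.mp hx).2
    simp only [decide_eq_true_eq] at h2
    rw [PySem.List.mem_pyRange_neg_one]
    have := hle_hi x h1
    have := hone x h1
    constructor <;> omega
  rw [stable_sort_desc _ _ _ hD hmemD]
  simp only [List.nil_append]
  refine List.flatMap_congr ?_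
  intro c hc
  have hcge : lo - 1 < c := (PySem.List.mem_pyRange_neg_one.mp hc).1
  rw [hR, List.filter_filter]
  refine List.filter_congr ?_
  intro x hx
  by_cases hxc : (allNums.count x : Int) = c
  · have hmc : mins ≤ c := by
      have h1 : lo = max mins 1 := hlo
      have h2 : mins ≤ max mins 1 := le_max_left mins 1
      omega
    simp [hxc, hmc]
  · simp [hxc]

-- ===== VERDICT (by name: the statement is the Claim_ definition above) =====
theorem find_recurring_numbers_py_spec : Claim_equal_find_recurring_numbers_py := by
  intro yn mins _
  unfold Spec_find_recurring_numbers_py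
  unfold find_recurring_numbers_py find_recurring_numbers_py_alt
  simp only [PySem.Dict.values]
  rw [counterA, counterB]
  by_cases hemp : (PySem.Dict.ofList yn).items = []
  · rw [if_pos hemp, hemp]
    have h1 : max mins 1 - 1 ≥ 0 := by omega
    simp [PySem.List.pyRange_neg_one_eq_nil (by omega : (0:Int) ≤ max mins 1 - 1),
      PySem.Dict.counter, PySem.Dict.empty, PySem.List.slice]
  · rw [if_neg hemp]
    rw [core]
    simp only [PySem.Dict.values]
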